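-- pv_equiv track=rewrite | github.com/yangmillstheory/EPIJudge | epi_judge_python/search_entry_equal_to_index.py | search_entry_equal_to_its_index
-- ===== SOURCE A (Python) =====
-- def search_entry_equal_to_its_index(a):
--     # T(n) = O(log n)
--     # S(n) = O(1)
--     lo, hi = 0, len(a)-1
--     while lo <= hi:
--         mid = lo + (hi-lo)//2
--         if a[mid] == mid:
--             return mid
--         elif a[mid] < mid:
--             lo = mid+1
--         else:
--             hi = mid-1
--     return -1
-- ===== SOURCE B (Python) =====
-- def search_entry_equal_to_its_index(a):
--     # Divide and conquer on list slices with an index offset, instead of an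
--     # index-pair loop over the full array.
--     def go(seg, off):
--         if not seg:
--             return -1
--         m = (len(seg) - 1) // 2
--         v = seg[m]
--         if v == off + m:
--             return off + m
--         if v < off + m:
--             return go(seg[m + 1:], off + m + 1)
--         return go(seg[:m], off)
--     return go(a, 0)
-- ===== Notes on version B (the rewrite author's own statement) =====
-- stated objective: alternative
-- what changed: Replaces the lo/hi index-pair while loop with a recursive divide-and-conquer that carries a shrinking list slice plus an index offset, recursing into the left or right half.
import Mathlib
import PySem

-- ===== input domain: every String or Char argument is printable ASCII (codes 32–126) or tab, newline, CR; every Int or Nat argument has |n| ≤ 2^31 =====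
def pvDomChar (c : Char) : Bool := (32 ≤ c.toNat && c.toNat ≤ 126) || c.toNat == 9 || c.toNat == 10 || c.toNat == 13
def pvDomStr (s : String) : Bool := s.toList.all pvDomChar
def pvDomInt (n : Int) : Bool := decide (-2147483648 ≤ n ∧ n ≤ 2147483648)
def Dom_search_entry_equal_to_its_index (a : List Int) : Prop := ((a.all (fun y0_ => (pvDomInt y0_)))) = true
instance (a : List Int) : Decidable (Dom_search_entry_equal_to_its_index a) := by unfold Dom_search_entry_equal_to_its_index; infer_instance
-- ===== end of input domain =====

-- B replaces the lo/hi index-pair while loop by divide-and-conquer on shrinking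
-- list slices carried with an index offset (alternative decomposition, same results).

-- ===== PORT A =====
-- the while loop of A, state (lo, hi); a[mid] is always in range when
-- 0 ≤ lo ≤ mid ≤ hi < len(a), so getD's default 0 is never used on reachable states
def pvLoopA (a : List Int) (lo hi : Int) : Int :=
  if _h : lo ≤ hi then
    let mid := lo + PySem.Int.floordiv (hi - lo) 2
    let v := (PySem.List.pyGet? a mid).getD 0
    if v = mid then mid
    else if v < mid then pvLoopA a (mid + 1) hi
    else pvLoopA a lo (mid - 1)
  else -1
termination_by (hi + 1 - lo).toNat
decreasing_by
  all_goals
    have hd : PySem.Int.floordiv (hi - lo) 2 = (hi - lo) / 2 :=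
      PySem.Int.floordiv_eq_ediv_of_pos (by omega)
    simp only [hd] at *
    omega

def search_entry_equal_to_its_index (a : List Int) : Int :=
  pvLoopA a 0 ((a.length : Int) - 1)

-- ===== PORT B =====
-- go(seg, off): recursive divide and conquer on the slice seg of the original
-- array starting at index off; seg[m] always in range since m < len(seg)
def pvGoB (seg : List Int) (off : Int) : Int :=
  if hne0 : seg.isEmpty then -1
  else
    let m : Nat := (seg.length - 1) / 2
    let v := (PySem.List.pyGet? seg (m : Int)).getD 0
    if v = off + (m : Int) then off + (m : Int)
    else if v < off + (m : Int) then
      pvGoB (PySem.List.slice seg (some ((m + 1 : Nat) : Int)) none) (off + (m : Int) + 1)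
    else
      pvGoB (PySem.List.slice seg none (some ((m : Nat) : Int))) off
termination_by seg.length
decreasing_by
  all_goals
    simp only [PySem.List.slice_from_natCast, PySem.List.slice_to_natCast,
      List.length_drop, List.length_take]
    have : seg ≠ [] := by simpa [List.isEmpty_iff] using hne0
    have : 0 < seg.length := List.length_pos_of_ne_nil this
    omega

def search_entry_equal_to_its_index_alt (a : List Int) : Int :=
  pvGoB a 0

-- ===== PRECONDITION & SPEC =====
def Spec_search_entry_equal_to_its_index (a : List Int) (out : Int) : Prop := out = search_entry_equal_to_its_index_alt a
instance (a : List Int) (out : Int) : Decidable (Spec_search_entry_equal_to_its_index a out) := by unfold Spec_search_entry_equal_to_its_index; infer_instance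

-- ===== CLAIM (what is proved, stated in full; the proofs are below) =====
def Claim_equal_search_entry_equal_to_its_index : Prop := ∀ (a : List Int), Dom_search_entry_equal_to_its_index a → Spec_search_entry_equal_to_its_index a (search_entry_equal_to_its_index a)

-- ===== LEMMAS AND PROOFS =====

-- key invariant: A's loop on (lo, hi) equals B's recursion on the slice a[lo : hi+1] with offset lo
theorem pvLoopA_eq_goB (k : Nat) : ∀ (a : List Int) (lo hi : Int),
    0 ≤ lo → hi < (a.length : Int) → (hi + 1 - lo).toNat ≤ k →
    pvLoopA a lo hi = pvGoB ((a.drop lo.toNat).take (hi + 1 - lo).toNat) lo := by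
  induction k with
  | zero =>
    intro a lo hi h0 hlen hk
    have hle : ¬ lo ≤ hi := by omega
    rw [pvLoopA, pvGoB]
    simp [hle, show (hi + 1 - lo).toNat = 0 by omega]
  | succ k ih =>
    intro a lo hi h0 hlen hk
    by_cases hle : lo ≤ hi
    · -- set up the common quantities
      set n : Nat := (hi + 1 - lo).toNat with hn
      have hn1 : 1 ≤ n := by omega
      have hdropl : (a.drop lo.toNat).length = a.length - lo.toNat := by
        simp
      have hsegl : ((a.drop lo.toNat).take n).length = n := by
        simp [hdropl]; omega
      set seg := (a.drop lo.toNat).take n with hseg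
      have hd : PySem.Int.floordiv (hi - lo) 2 = (hi - lo) / 2 :=
        PySem.Int.floordiv_eq_ediv_of_pos (by omega)
      set m : Nat := (n - 1) / 2 with hm
      have hmid : lo + PySem.Int.floordiv (hi - lo) 2 = lo + (m : Int) := by
        rw [hd]; omega
      have hmn : m < n := by omega
      -- the probed element is the same on both sides
      have hidx : lo.toNat + m < a.length := by omega
      have hsegm : seg[m]? = some a[lo.toNat + m] := by
        rw [hseg, List.getElem?_take_of_lt hmn]
        simp [ List.getElem?_drop, List.getElem?_eq_getElem hidx]
      have hA : PySem.List.pyGet? a (lo + (m : Int)) = some a[lo.toNat + m] := by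
        rw [PySem.List.pyGet?_of_nonneg a (by omega)]
        have : (lo + (m : Int)).toNat = lo.toNat + m := by omega
        rw [this, List.getElem?_eq_getElem hidx]
      have hB : PySem.List.pyGet? seg ((m : Nat) : Int) = some a[lo.toNat + m] := by
        rw [PySem.List.pyGet?_natCast, hsegm]
      set v : Int := a[lo.toNat + m] with hv
      rw [pvLoopA, pvGoB]
      have hne : ¬ seg.isEmpty := by
        simp [List.isEmpty_iff, ← List.length_pos_iff_ne_nil, hsegl]; omega
      simp only [hle, dif_pos, hne, hmid, hsegl, ← hm,
        hA, hB, Option.getD_some]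
      by_cases he : v = lo + (m : Int)
      · simp [he]
      · simp only [he, if_false]
        by_cases hlt : v < lo + (m : Int)
        · -- go right
          simp only [hlt, if_true]
          rw [PySem.List.slice_from_natCast, hseg, List.drop_take, List.drop_drop]
          have h1 : (lo + (m : Int) + 1).toNat = lo.toNat + (m + 1) := by omega
          have h2 : n - (m + 1) = (hi + 1 - (lo + (m : Int) + 1)).toNat := by omega
          rw [ih a (lo + (m : Int) + 1) hi (by omega) hlen (by omega), h1, ← h2]
          simp
        · -- go left
          simp only [hlt, if_false]
          rw [PySem.List.slice_to_natCast, hseg, List.take_take]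
          have h3 : min m n = (lo + (m : Int) - 1 + 1 - lo).toNat := by omega
          rw [ih a lo (lo + (m : Int) - 1) h0 (by omega) (by omega), h3]
          simp
    · rw [pvLoopA, pvGoB]
      simp [hle, show (hi + 1 - lo).toNat = 0 by omega]

-- ===== VERDICT (by name: the statement is the Claim_ definition above) =====
theorem search_entry_equal_to_its_index_spec : Claim_equal_search_entry_equal_to_its_index := by
  intro a _
  unfold Spec_search_entry_equal_to_its_index search_entry_equal_to_its_index
    search_entry_equal_to_its_index_alt
  rw [pvLoopA_eq_goB a.length a 0 ((a.length : Int) - 1) le_rfl (by omega) (by omega)]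
  simp
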